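-- pv_equiv track=rewrite | github.com/TeodorChaly/FAST-API-Project | content/functions.py | get_all_articles
-- ===== SOURCE A (Python) =====
-- def get_all_articles(articles, category, page):
--     page_articles_max = 5
--     filtered_articles = [article for article in articles if article.get("category").lower() == category.lower()]
--     total_articles = len(filtered_articles)
--     total_pages = (total_articles + page_articles_max - 1) // page_articles_max
--     start_index = (page - 1) * page_articles_max
--     end_index = start_index + page_articles_max
--     filtered_articles = filtered_articles[start_index:end_index]
--     return filtered_articles, total_pages
-- ===== SOURCE B (Python) =====
-- def get_all_articles(articles, category, page):
--     per = 5
--     cat = category.lower()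
--     start = (page - 1) * per
--     end = start + per
--     out = []
--     matches = 0
--     for article in articles:
--         if article.get("category").lower() == cat:
--             if start <= matches < end:
--                 out.append(article)
--             matches += 1
--     total_pages = -(-matches // per)
--     return out, total_pages
-- ===== Notes on version B (the rewrite author's own statement) =====
-- stated objective: alternative
-- what changed: B never builds the filtered list or slices it: a single pass keeps a match counter and appends only the articles whose match index falls in the page window, then derives total_pages from the final count; Pre_ excludes articles without a 'category' key, where A raises AttributeError.
-- intended difference: For page < 0 when more than 5*|page| articles match, A's negative slice indices wrap around and return articles from near the end of the filtered list, while B returns an empty page, the intended result for a nonexistent page number. — e.g. on get_all_articles(([[("category", "t")], [("category", "t")], [("category", "t")], [("category", "t")], [("category", "t")], [("category"…): A returns ([[("category", "t")]], 2), B returns ([], 2)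
import Mathlib
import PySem

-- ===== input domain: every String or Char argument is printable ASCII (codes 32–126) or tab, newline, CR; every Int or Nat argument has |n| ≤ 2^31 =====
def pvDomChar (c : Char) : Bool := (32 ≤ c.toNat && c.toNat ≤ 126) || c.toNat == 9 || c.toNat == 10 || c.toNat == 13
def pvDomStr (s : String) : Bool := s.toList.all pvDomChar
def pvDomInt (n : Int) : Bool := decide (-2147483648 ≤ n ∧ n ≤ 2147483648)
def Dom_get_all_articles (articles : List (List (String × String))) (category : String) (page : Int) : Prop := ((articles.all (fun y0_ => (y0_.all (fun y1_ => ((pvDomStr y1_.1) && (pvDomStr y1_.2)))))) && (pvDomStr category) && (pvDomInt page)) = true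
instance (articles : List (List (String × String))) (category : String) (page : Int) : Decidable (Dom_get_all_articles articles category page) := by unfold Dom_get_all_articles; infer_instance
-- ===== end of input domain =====

-- B is a single counting pass (no filtered list, no slice) and returns an empty page for
-- negative page numbers, where A's negative slice indices wrap; return value only, no mutation.

-- article.get("category"): first-match lookup in the association list (Python dict lookup)
def pvGetCat (a : List (String × String)) : Option String :=
  (a.find? (fun kv => kv.1 == "category")).map (·.2)

-- ===== PORT A =====
def get_all_articles (articles : List (List (String × String))) (category : String) (page : Int) : (List (List (String × String))) × Int :=
  let per : Int := 5
  let filtered := articles.filter (fun a => PySem.Str.lower ((pvGetCat a).getD "") == PySem.Str.lower category)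
  let total : Int := filtered.length
  let total_pages := PySem.Int.floordiv (total + per - 1) per
  let start_index := (page - 1) * per
  let end_index := start_index + per
  (PySem.List.slice filtered (some start_index) (some end_index), total_pages)

-- ===== PORT B =====
def get_all_articles_alt (articles : List (List (String × String))) (category : String) (page : Int) : (List (List (String × String))) × Int :=
  let per : Int := 5
  let cat := PySem.Str.lower category
  let start := (page - 1) * per
  let e := start + per
  let st := articles.foldl (fun st a =>
    if PySem.Str.lower ((pvGetCat a).getD "") == cat then
      (if start ≤ st.2 ∧ st.2 < e then st.1 ++ [a] else st.1, st.2 + 1)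
    else st) (([] : List (List (String × String))), (0 : Int))
  (st.1, -(PySem.Int.floordiv (-st.2) per))

-- ===== PRECONDITION & SPEC =====
-- Pre_ excludes articles with no "category" key: there Python's a.get("category") is None and .lower() raises AttributeError.
def Pre_get_all_articles (articles : List (List (String × String))) (category : String) (page : Int) : Prop :=
  ∀ a ∈ articles, (pvGetCat a).isSome = true
instance (articles : List (List (String × String))) (category : String) (page : Int) : Decidable (Pre_get_all_articles articles category page) := by unfold Pre_get_all_articles; infer_instance

def pvWitness_get_all_articles : (List (List (String × String))) × String × Int :=
  ([[("category", "Tech"), ("title", "a")], [("category", "food")]], "tech", 1)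

-- For page < 0 when more than 5*|page| articles match, A's negative slice indices wrap around and
-- return articles from near the end of the filtered list; B returns an empty page, the intended
-- result for a nonexistent page number.
-- the article's category, lower-cased, as a character list (a property of the input)
def pvCatOf : List (String × String) → List Char
  | [] => []
  | (k, v) :: rest => if k = "category" then PySem.Chars.lower v.toList else pvCatOf rest

def D_get_all_articles (articles : List (List (String × String))) (category : String) (page : Int) : Prop :=
  page < 0 ∧ 5 * (-page) < (articles.countP (fun a => pvCatOf a == pvCatOf [("category", category)]) : Int)
instance (articles : List (List (String × String))) (category : String) (page : Int) : Decidable (D_get_all_articles articles category page) := by unfold D_get_all_articles; infer_instance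

def Spec_get_all_articles (articles : List (List (String × String))) (category : String) (page : Int) (out : (List (List (String × String))) × Int) : Prop := ¬ D_get_all_articles articles category page → out = get_all_articles_alt articles category page
instance (articles : List (List (String × String))) (category : String) (page : Int) (out : (List (List (String × String))) × Int) : Decidable (Spec_get_all_articles articles category page out) := by unfold Spec_get_all_articles; infer_instance

def pvDiffWitness_get_all_articles : (List (List (String × String))) × String × Int :=
  ([[("category", "t")], [("category", "t")], [("category", "t")], [("category", "t")], [("category", "t")], [("category", "t")]], "t", -1)

def pvDiffWitnessOut_get_all_articles : ((List (List (String × String))) × Int) × ((List (List (String × String))) × Int) :=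
  (([[("category", "t")]], 2), ([], 2))

-- ===== CLAIM (what is proved, stated in full; the proofs are below) =====
def Claim_unchanged_get_all_articles : Prop := ∀ (articles : List (List (String × String))) (category : String) (page : Int), Dom_get_all_articles articles category page → Pre_get_all_articles articles category page → Spec_get_all_articles articles category page (get_all_articles articles category page)
def Claim_changed_get_all_articles : Prop := Dom_get_all_articles (pvDiffWitness_get_all_articles.1) (pvDiffWitness_get_all_articles.2.1) (pvDiffWitness_get_all_articles.2.2) ∧ Pre_get_all_articles (pvDiffWitness_get_all_articles.1) (pvDiffWitness_get_all_articles.2.1) (pvDiffWitness_get_all_articles.2.2) ∧ D_get_all_articles (pvDiffWitness_get_all_articles.1) (pvDiffWitness_get_all_articles.2.1) (pvDiffWitness_get_all_articles.2.2) ∧ get_all_articles (pvDiffWitness_get_all_articles.1) (pvDiffWitness_get_all_articles.2.1) (pvDiffWitness_get_all_articles.2.2) = pvDiffWitnessOut_get_all_articles.1 ∧ get_all_articles_alt (pvDiffWitness_get_all_articles.1) (pvDiffWitness_get_all_articles.2.1) (pvDiffWitness_get_all_articles.2.2) = pvDiffWitnessOut_get_all_articles.2 ∧ pvDiffWitnessOut_get_all_articles.1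 ≠ pvDiffWitnessOut_get_all_articles.2
def Claim_exact_get_all_articles : Prop := ∀ (articles : List (List (String × String))) (category : String) (page : Int), Dom_get_all_articles articles category page → Pre_get_all_articles articles category page → D_get_all_articles articles category page → get_all_articles articles category page ≠ get_all_articles_alt articles category page

-- ===== LEMMAS AND PROOFS =====

-- pvCatOf agrees with the ports' dict lookup + lower
theorem pvCatOf_eq (a : List (String × String)) :
    pvCatOf a = PySem.Chars.lower (((pvGetCat a).getD "").toList) := by
  induction a with
  | nil => simp [pvCatOf, pvGetCat, PySem.Chars.lower]
  | cons kv rest ih =>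
    obtain ⟨k, v⟩ := kv
    by_cases h : k = "category"
    · simp [pvCatOf, pvGetCat, h]
    · simp only [pvCatOf, h, if_false, ih, pvGetCat]
      rw [List.find?_cons_of_neg (by simp [h])]

-- the per-article match tests of D_ and of the ports coincide
theorem pvMatch_eq (a : List (String × String)) (category : String) :
    (PySem.Str.lower ((pvGetCat a).getD "") == PySem.Str.lower category)
      = (pvCatOf a == pvCatOf [("category", category)]) := by
  have hc : pvCatOf [("category", category)] = PySem.Chars.lower category.toList := by
    simp [pvCatOf]
  rw [hc, pvCatOf_eq]
  by_cases h : PySem.Str.lower ((pvGetCat a).getD "") = PySem.Str.lower category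
  · have ht := congrArg String.toList h
    rw [PySem.Str.toList_lower, PySem.Str.toList_lower] at ht
    simp [h, ht]
  · have ht : ¬ PySem.Chars.lower (((pvGetCat a).getD "").toList)
        = PySem.Chars.lower category.toList := by
      intro hc
      exact h (String.ext (by simpa [← PySem.Str.toList_lower] using hc))
    simp [h, ht]

-- the match count of D_ is the length of A's filtered list
theorem pvMatchCount_eq (articles : List (List (String × String))) (category : String) :
    articles.countP (fun a => pvCatOf a == pvCatOf [("category", category)])
      = (articles.filter (fun a => PySem.Str.lower ((pvGetCat a).getD "") == PySem.Str.lower category)).length := by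
  rw [List.countP_eq_length_filter,
      List.filter_congr (fun a _ => (pvMatch_eq a category).symm)]

-- reference picker over the filtered list
def pvPick (s e : Int) : List (List (String × String)) → Int → List (List (String × String))
  | [], _ => []
  | x :: xs, i => (if s ≤ i ∧ i < e then [x] else []) ++ pvPick s e xs (i + 1)

-- B's fold, characterized over the filtered list
theorem pvFold_char (cat : String) (s e : Int) (l : List (List (String × String)))
    (acc : List (List (String × String))) (i : Int) :
    l.foldl (fun st a =>
      if PySem.Str.lower ((pvGetCat a).getD "") == cat then
        (if s ≤ st.2 ∧ st.2 < e then st.1 ++ [a] else st.1, st.2 + 1)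
      else st) (acc, i)
      = (acc ++ pvPick s e (l.filter (fun a => PySem.Str.lower ((pvGetCat a).getD "") == cat)) i,
         i + (l.filter (fun a => PySem.Str.lower ((pvGetCat a).getD "") == cat)).length) := by
  induction l generalizing acc i with
  | nil => simp [pvPick]
  | cons x xs ih =>
    simp only [List.foldl_cons, List.filter_cons]
    by_cases h : (PySem.Str.lower ((pvGetCat x).getD "") == cat) = true
    · simp only [h, if_pos]
      rw [ih]
      by_cases hw : s ≤ i ∧ i < e
      · simp only [pvPick, hw, and_self, if_pos, List.length_cons, List.singleton_append,
          List.append_assoc, Prod.mk.injEq, true_and]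
        push_cast; omega
      · simp only [pvPick, hw, if_neg, not_false_iff, List.length_cons, List.nil_append,
          Prod.mk.injEq]
        refine ⟨trivial, ?_⟩
        push_cast; omega
    · simp only [h]
      rw [ih]
      simp

-- pvPick = drop/take
theorem pvPick_eq_drop_take (s e : Int) (xs : List (List (String × String))) (i : Int) :
    pvPick s e xs i = (xs.drop (s - i).toNat).take ((e - i).toNat - (s - i).toNat) := by
  induction xs generalizing i with
  | nil => simp [pvPick]
  | cons x t ih =>
    simp only [pvPick]
    by_cases hs : s ≤ i
    · by_cases he : i < e
      · have h1 : (s - i).toNat = 0 := by omega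
        have h2 : (e - i).toNat = (e - (i+1)).toNat + 1 := by omega
        have h3 : (s - (i+1)).toNat = 0 := by omega
        rw [ih]
        simp [hs, he, h1, h2, h3]
      · have h1 : (e - i).toNat = 0 := by omega
        have h2 : (e - (i+1)).toNat = 0 := by omega
        rw [ih]
        simp [he, h1, h2]
    · have h1 : (s - i).toNat = (s - (i+1)).toNat + 1 := by omega
      rw [ih]
      have hd : (x :: t).drop ((s - i).toNat) = t.drop ((s - (i+1)).toNat) := by
        rw [h1]; rfl
      rw [hd]
      have hc : ¬ (s ≤ i ∧ i < e) := by omega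
      simp only [hc, if_neg, not_false_iff, List.nil_append]
      congr 1
      omega

-- ceiling division: -((-t) // 5) = (t + 5 - 1) // 5
theorem pvPages_eq (t : Int) :
    -(PySem.Int.floordiv (-t) 5) = PySem.Int.floordiv (t + 5 - 1) 5 := by
  rw [PySem.Int.floordiv_eq_ediv_of_pos (by omega), PySem.Int.floordiv_eq_ediv_of_pos (by omega)]
  omega

-- Python's slice with both bounds, as drop/take over clamped indices
theorem pvSliceChar {α : Type} (xs : List α) (a b : Int) :
    PySem.List.slice xs (some a) (some b)
      = (xs.drop (PySem.List.clampIdx xs.length a)).take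
          (PySem.List.clampIdx xs.length b - PySem.List.clampIdx xs.length a) := by
  unfold PySem.List.slice
  rfl

-- drop/take windows agree whether or not the bounds are pre-clamped to the length
theorem pvWin {α : Type} (xs : List α) (s e : Nat) :
    (xs.drop (min s xs.length)).take (min e xs.length - min s xs.length)
      = (xs.drop s).take (e - s) := by
  by_cases hs : s ≤ xs.length
  · have h1 : min s xs.length = s := by omega
    rw [h1]
    by_cases he : e ≤ xs.length
    · rw [min_eq_left he]
    · rw [min_eq_right (by omega)]
      rw [List.take_of_length_le (by simp only [List.length_drop]; omega),
          List.take_of_length_le (by simp only [List.length_drop]; omega)]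
  · have h1 : min s xs.length = xs.length := by omega
    rw [h1, List.drop_length, List.drop_eq_nil_of_le (by omega)]
    simp

-- the two window computations coincide outside the wraparound region
theorem pvSliceEq (xs : List (List (String × String))) (s e : Int) (he : e = s + 5)
    (h : 0 ≤ s ∨ (e ≤ 0 ∧ ((xs.length : Int) + e ≤ 0 ∨ e = 0))) :
    PySem.List.slice xs (some s) (some e) = pvPick s e xs 0 := by
  rw [pvSliceChar, pvPick_eq_drop_take, sub_zero, sub_zero]
  rcases h with h0 | ⟨he0, h⟩
  · have hcs : PySem.List.clampIdx xs.length s = min s.toNat xs.length := by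
      unfold PySem.List.clampIdx; split_ifs <;> omega
    have hce : PySem.List.clampIdx xs.length e = min e.toNat xs.length := by
      unfold PySem.List.clampIdx; split_ifs <;> omega
    rw [hcs, hce, pvWin]
  · have hce : PySem.List.clampIdx xs.length e = 0 := by
      unfold PySem.List.clampIdx; split_ifs <;> omega
    have hs0 : s.toNat = 0 := by omega
    have he0' : e.toNat = 0 := by omega
    simp [hce, hs0, he0']

-- B's result, rewritten through the filtered list
theorem pvAlt_char (articles : List (List (String × String))) (category : String) (page : Int) :
    get_all_articles_alt articles category page
      = (pvPick ((page - 1) * 5) ((page - 1) * 5 + 5)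
           (articles.filter (fun a => PySem.Str.lower ((pvGetCat a).getD "") == PySem.Str.lower category)) 0,
         -(PySem.Int.floordiv
             (-((articles.filter (fun a => PySem.Str.lower ((pvGetCat a).getD "") == PySem.Str.lower category)).length : Int)) 5)) := by
  simp only [get_all_articles_alt]
  rw [pvFold_char]
  simp

-- inside D_, A's page is nonempty
theorem pvSlice_ne_nil (xs : List (List (String × String))) (s e : Int) (hs : s = e - 5)
    (he : e < 0) (hn : 0 < (xs.length : Int) + e) :
    PySem.List.slice xs (some s) (some e) ≠ [] := by
  rw [pvSliceChar]
  intro hnil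
  have hlen := congrArg List.length hnil
  simp only [List.length_take, List.length_drop, List.length_nil] at hlen
  have hce : PySem.List.clampIdx xs.length e = ((xs.length : Int) + e).toNat := by
    unfold PySem.List.clampIdx; split_ifs <;> omega
  have hcs : PySem.List.clampIdx xs.length s ≤ ((xs.length : Int) + e).toNat - 1 := by
    unfold PySem.List.clampIdx; split_ifs <;> omega
  have hcsn : PySem.List.clampIdx xs.length s < xs.length := by
    unfold PySem.List.clampIdx; split_ifs <;> omega
  omega

-- ===== VERDICT (by name: the statement is the Claim_ definition above) =====
theorem get_all_articles_spec : Claim_unchanged_get_all_articles := by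
  intro articles category page _ _ hD'
  rw [pvAlt_char]
  unfold get_all_articles
  simp only [D_get_all_articles, pvMatchCount_eq, not_and, not_lt] at hD'
  refine Prod.ext ?_ ?_
  · apply pvSliceEq _ _ _ rfl
    by_cases hp : 0 ≤ (page - 1) * 5
    · exact Or.inl hp
    · right
      constructor
      · omega
      · by_cases hz : page = 0
        · right; omega
        · left
          have := hD' (by omega)
          omega
  · exact (pvPages_eq _).symm

theorem get_all_articles_changed : Claim_changed_get_all_articles := by
  unfold Claim_changed_get_all_articles; decide

theorem get_all_articles_tight : Claim_exact_get_all_articles := by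
  intro articles category page _ _ hD
  obtain ⟨hp, hn⟩ := hD
  rw [pvMatchCount_eq] at hn
  rw [pvAlt_char]
  unfold get_all_articles
  intro heq
  have h1 := congrArg Prod.fst heq
  simp only at h1
  have h2 : pvPick ((page - 1) * 5) ((page - 1) * 5 + 5)
      (articles.filter (fun a => PySem.Str.lower ((pvGetCat a).getD "") == PySem.Str.lower category)) 0 = [] := by
    rw [pvPick_eq_drop_take]
    have he0 : ((page - 1) * 5 + 5 - 0).toNat - ((page - 1) * 5 - 0).toNat = 0 := by omega
    rw [he0]
    simp
  rw [h2] at h1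
  exact pvSlice_ne_nil _ _ ((page - 1) * 5 + 5) (by ring) (by omega) (by omega) h1
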